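-- pv_equiv track=rewrite | github.com/followkim/LilL3x | beings/AI_class.py | StripActions
-- ===== SOURCE A (Python) =====
-- def StripActions(txt):
--     exclude = False
--     newStr = ""
--     for s in txt:
--         if s == '*':
--             if exclude:
--                 exclude = False
--             else:
--                 exclude = True
--             continue
--         elif not exclude:
--             newStr += s
--     newStr = str(newStr.encode('ascii', 'ignore').decode("utf-8"))
--     return newStr
-- ===== SOURCE B (Python) =====
-- def StripActions(txt):
--     # Walk the text segment by segment with str.partition: keep the piece
--     # before each '*', drop the piece up to the matching '*', repeat.
--     pieces = []
--     rest = txt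
--     while True:
--         keep, sep, rest = rest.partition('*')
--         pieces.append(keep)
--         if not sep:
--             break
--         _dropped, sep, rest = rest.partition('*')
--         if not sep:
--             break
--     return ''.join(pieces).encode('ascii', 'ignore').decode('utf-8')
-- ===== Notes on version B (the rewrite author's own statement) =====
-- stated objective: simpler
-- what changed: Replaced the per-character exclude-flag toggle loop with a segment-at-a-time str.partition loop that appends whole kept segments and skips whole excluded ones, joining at the end.
import Mathlib
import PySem

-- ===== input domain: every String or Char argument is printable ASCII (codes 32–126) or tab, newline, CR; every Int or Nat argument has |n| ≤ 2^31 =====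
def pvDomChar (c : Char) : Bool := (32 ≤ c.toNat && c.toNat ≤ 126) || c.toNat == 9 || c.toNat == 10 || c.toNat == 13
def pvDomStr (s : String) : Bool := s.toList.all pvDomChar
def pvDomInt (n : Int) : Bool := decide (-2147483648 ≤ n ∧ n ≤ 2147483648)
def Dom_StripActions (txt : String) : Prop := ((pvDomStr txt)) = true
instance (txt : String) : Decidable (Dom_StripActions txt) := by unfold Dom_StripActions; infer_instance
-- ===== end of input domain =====

-- B replaces A's per-character exclude-flag toggle with a segment-at-a-time partition loop (simpler; same cost).

-- ===== PORT A =====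
-- the loop body: toggle the exclude flag on '*', otherwise append when not excluding
def pvStepA (st : Bool × List Char) (s : Char) : Bool × List Char :=
  if s = '*' then
    (if st.1 then (false, st.2) else (true, st.2))
  else if !st.1 then (st.1, st.2 ++ [s])
  else st

-- the per-character loop; .encode('ascii','ignore').decode drops the chars with code > 127
def StripActions (txt : String) : String :=
  String.ofList ((txt.toList.foldl pvStepA (false, [])).2.filter (fun c => c.toNat ≤ 127))

-- ===== PORT B =====
-- rest.partition('*') → (part before the first '*', found?, part after it); exact hand port of str.partition for a 1-char separator
def pvPartStar (cs : List Char) : List Char × Bool × List Char :=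
  match cs.dropWhile (· ≠ '*') with
  | [] => (cs.takeWhile (· ≠ '*'), false, [])
  | _ :: t => (cs.takeWhile (· ≠ '*'), true, t)

-- termination fact for the loop below: a successful partition strictly shrinks the rest
theorem pvPartStar_snd_len (cs : List Char) (h : (pvPartStar cs).2.1 = true) :
    (pvPartStar cs).2.2.length < cs.length := by
  rcases hne : List.dropWhile (fun x => !decide (x = '*')) cs with _ | ⟨c, t⟩
  · exfalso; simp [pvPartStar, hne] at h
  · have hle := List.length_dropWhile_le (fun x => !decide (x = '*')) cs
    rw [hne] at hle
    simp only [List.length_cons] at hle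
    simp [pvPartStar, hne]
    omega

-- the while loop of Source B: keep a segment, drop a segment, repeat
def pvAltGo (rest : List Char) (pieces : List (List Char)) : List (List Char) :=
  let p1 := pvPartStar rest
  if p1.2.1 then
    let p2 := pvPartStar p1.2.2
    if p2.2.1 then pvAltGo p2.2.2 (pieces ++ [p1.1])
    else pieces ++ [p1.1]
  else pieces ++ [p1.1]
termination_by rest.length
decreasing_by
  rename_i h1 h2
  have l1 := pvPartStar_snd_len rest h1
  have l2 := pvPartStar_snd_len (pvPartStar rest).2.2 h2
  omega

-- ''.join(pieces) is flatten; then the same ascii-ignore filter as A's last line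
def StripActions_alt (txt : String) : String :=
  String.ofList ((pvAltGo txt.toList []).flatten.filter (fun c => c.toNat ≤ 127))

-- ===== PRECONDITION & SPEC =====
def Spec_StripActions (txt : String) (out : String) : Prop := out = StripActions_alt txt
instance (txt : String) (out : String) : Decidable (Spec_StripActions txt out) := by unfold Spec_StripActions; infer_instance

-- ===== CLAIM (what is proved, stated in full; the proofs are below) =====
def Claim_equal_StripActions : Prop := ∀ (txt : String), Dom_StripActions txt → Spec_StripActions txt (StripActions txt)

-- ===== LEMMAS AND PROOFS =====

-- reference recursion: the characters A keeps, starting from exclude flag e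
def keepRec : Bool → List Char → List Char
  | _, [] => []
  | e, c :: cs => if c = '*' then keepRec (!e) cs else if e then keepRec e cs else c :: keepRec e cs

theorem foldA_eq (cs : List Char) (e : Bool) (acc : List Char) :
    (cs.foldl pvStepA (e, acc)).2 = acc ++ keepRec e cs := by
  induction cs generalizing e acc with
  | nil => simp [keepRec]
  | cons c cs ih =>
    by_cases hc : c = '*'
    · cases e <;> simp [List.foldl_cons, pvStepA, hc, keepRec, ih]
    · cases e <;> simp [List.foldl_cons, pvStepA, hc, keepRec, ih]

theorem keepRec_true_eq (cs : List Char) :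
    keepRec true cs =
      (match cs.dropWhile (· ≠ '*') with | [] => [] | _ :: t => keepRec false t) := by
  induction cs with
  | nil => simp [keepRec]
  | cons c cs ih =>
    by_cases hc : c = '*'
    · simp [keepRec, hc, List.dropWhile]
    · simp [keepRec, hc, List.dropWhile, ih]

theorem keepRec_false_eq (cs : List Char) :
    keepRec false cs = cs.takeWhile (· ≠ '*') ++
      (match cs.dropWhile (· ≠ '*') with | [] => [] | _ :: t => keepRec true t) := by
  induction cs with
  | nil => simp [keepRec]
  | cons c cs ih =>
    by_cases hc : c = '*'
    · simp [keepRec, hc, List.dropWhile, List.takeWhile]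
    · simp [keepRec, hc, List.dropWhile, List.takeWhile, ih]

-- the two keepRec unfoldings phrased through pvPartStar
theorem keepRec_true_part (cs : List Char) :
    keepRec true cs =
      (if (pvPartStar cs).2.1 then keepRec false (pvPartStar cs).2.2 else []) := by
  rw [keepRec_true_eq]
  rcases hd : List.dropWhile (fun x => !decide (x = '*')) cs with _ | ⟨c, t⟩ <;>
    simp [pvPartStar, hd]

theorem keepRec_false_part (cs : List Char) :
    keepRec false cs = (pvPartStar cs).1 ++
      (if (pvPartStar cs).2.1 then keepRec true (pvPartStar cs).2.2 else []) := by
  rw [keepRec_false_eq]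
  rcases hd : List.dropWhile (fun x => !decide (x = '*')) cs with _ | ⟨c, t⟩ <;>
    simp [pvPartStar, hd]

-- loop invariant for B: the flattened pieces are exactly the kept characters
theorem pvAltGo_flatten (rest : List Char) (pieces : List (List Char)) :
    (pvAltGo rest pieces).flatten = pieces.flatten ++ keepRec false rest := by
  induction rest, pieces using pvAltGo.induct with
  | case1 rest pieces p1 h1 p2 h2 ih =>
    have hp1 : p1 = pvPartStar rest := rfl
    have hp2 : p2 = pvPartStar p1.2.2 := rfl
    rw [pvAltGo]
    simp only [← hp1, ← hp2, h1, h2, if_true]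
    rw [ih, keepRec_false_part rest, ← hp1, if_pos h1, keepRec_true_part, ← hp2, if_pos h2]
    simp
  | case2 rest pieces p1 h1 p2 h2 =>
    have hp1 : p1 = pvPartStar rest := rfl
    have hp2 : p2 = pvPartStar p1.2.2 := rfl
    simp only [Bool.not_eq_true] at h2
    rw [pvAltGo]
    simp only [← hp1, ← hp2, h1, h2, if_true, if_false]
    rw [keepRec_false_part rest, ← hp1, if_pos h1, keepRec_true_part, ← hp2, h2]
    simp
  | case3 rest pieces p1 h1 =>
    have hp1 : p1 = pvPartStar rest := rfl
    simp only [Bool.not_eq_true] at h1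
    rw [pvAltGo]
    simp only [← hp1, h1, if_false]
    rw [keepRec_false_part rest, ← hp1, h1]
    simp

-- ===== VERDICT (by name: the statement is the Claim_ definition above) =====
theorem StripActions_spec : Claim_equal_StripActions := by
  intro txt _
  unfold Spec_StripActions StripActions StripActions_alt
  rw [foldA_eq, pvAltGo_flatten]
  simp
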